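-- pv_equiv track=rewrite | github.com/MikeLaucella/chronos.net | chronos/data/chrono_transform.py | _build_key_map
-- ===== SOURCE A (Python) =====
-- def _build_key_map(images, masks):
--     additional = {}
--     forward = {}
--     reverse = {}
--
--     # First image → "image"
--     if images:
--         forward[images[0]] = "image"
--         reverse["image"] = images[0]
--
--     # First mask → "mask"
--     if masks:
--         forward[masks[0]] = "mask"
--         reverse["mask"] = masks[0]
--
--     # Additional images
--     for i, key in enumerate(images[1:], start=1):
--         alb_key = f"image{i}"
--         forward[key] = alb_key
--         reverse[alb_key] = key
--         additional[alb_key] = "image"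
--
--     # Additional masks
--     for i, key in enumerate(masks[1:], start=1):
--         alb_key = f"mask{i}"
--         forward[key] = alb_key
--         reverse[alb_key] = key
--         additional[alb_key] = "mask"
--
--     return additional, forward, reverse
-- ===== SOURCE B (Python) =====
-- def _build_key_map(images, masks):
--     pairs = (("image", images), ("mask", masks))
--     # Single source of truth: build only the reverse map (alb key -> original key).
--     reverse = {label: lst[0] for label, lst in pairs if lst}
--     for label, lst in pairs:
--         for i, key in enumerate(lst[1:], 1):
--             reverse[f"{label}{i}"] = key
--     # forward is reverse inverted; dict re-insertion semantics reproduce duplicate handling exactly.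
--     forward = {key: alb for alb, key in reverse.items()}
--     # additional is read off the alb keys: every non-head key belongs to its label prefix.
--     additional = {alb: ("image" if alb.startswith("image") else "mask")
--                   for alb in reverse if alb not in ("image", "mask")}
--     return additional, forward, reverse
-- ===== Notes on version B (the rewrite author's own statement) =====
-- stated objective: alternative
-- what changed: Instead of A's four blocks maintaining three dicts in parallel, B maintains a single source-of-truth dict (reverse: alb key -> original key) in one traversal, then derives forward by inverting reverse (relying on dict re-insertion semantics for duplicate filenames) and derives additional purely from the generated alb keys via startswith, never re-enumerating the input lists.
import Mathlib
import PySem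

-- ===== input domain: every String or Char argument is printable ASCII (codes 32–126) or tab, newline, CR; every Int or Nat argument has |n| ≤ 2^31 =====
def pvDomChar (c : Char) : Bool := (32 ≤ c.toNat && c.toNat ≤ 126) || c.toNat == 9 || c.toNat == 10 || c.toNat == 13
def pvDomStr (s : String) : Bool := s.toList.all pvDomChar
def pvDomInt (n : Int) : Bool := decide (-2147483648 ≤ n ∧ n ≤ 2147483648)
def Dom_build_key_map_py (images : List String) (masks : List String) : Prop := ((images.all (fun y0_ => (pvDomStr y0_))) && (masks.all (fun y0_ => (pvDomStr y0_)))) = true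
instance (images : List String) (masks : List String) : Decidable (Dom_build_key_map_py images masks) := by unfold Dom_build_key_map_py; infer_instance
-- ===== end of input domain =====

-- B maintains only the reverse dict (alb key -> original key) in one traversal and derives
-- forward by inverting it and additional from the generated alb keys; same return value as A.

-- ===== PORT A =====
def build_key_map_py (images : List String) (masks : List String) : (List (String × String)) × (List (String × String)) × (List (String × String)) :=
  let additional : PySem.Dict String String := PySem.Dict.empty
  let forward : PySem.Dict String String := PySem.Dict.empty
  let reverse : PySem.Dict String String := PySem.Dict.empty
  -- if images: forward[images[0]] = "image"; reverse["image"] = images[0]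
  let (forward, reverse) :=
    match images with
    | [] => (forward, reverse)
    | x :: _ => (forward.insert x "image", reverse.insert "image" x)
  -- if masks: forward[masks[0]] = "mask"; reverse["mask"] = masks[0]
  let (forward, reverse) :=
    match masks with
    | [] => (forward, reverse)
    | x :: _ => (forward.insert x "mask", reverse.insert "mask" x)
  -- for i, key in enumerate(images[1:], start=1): …
  let st := (PySem.List.enumerate (PySem.List.slice images (some 1) none) 1).foldl
    (fun (st : PySem.Dict String String × PySem.Dict String String × PySem.Dict String String) p =>
      let alb := "image" ++ PySem.Int.toStr p.1
      (st.1.insert p.2 alb, st.2.1.insert alb p.2, st.2.2.insert alb "image"))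
    (forward, reverse, additional)
  -- for i, key in enumerate(masks[1:], start=1): …
  let st := (PySem.List.enumerate (PySem.List.slice masks (some 1) none) 1).foldl
    (fun (st : PySem.Dict String String × PySem.Dict String String × PySem.Dict String String) p =>
      let alb := "mask" ++ PySem.Int.toStr p.1
      (st.1.insert p.2 alb, st.2.1.insert alb p.2, st.2.2.insert alb "mask"))
    st
  (st.2.2.items, st.1.items, st.2.1.items)

-- ===== PORT B =====
def build_key_map_py_alt (images : List String) (masks : List String) : (List (String × String)) × (List (String × String)) × (List (String × String)) :=
  let pairs : List (String × List String) := [("image", images), ("mask", masks)]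
  -- reverse = {label: lst[0] for label, lst in pairs if lst}
  let reverse : PySem.Dict String String :=
    pairs.foldl (fun d p =>
      match p.2 with
      | [] => d
      | x :: _ => d.insert p.1 x) PySem.Dict.empty
  -- for label, lst in pairs: for i, key in enumerate(lst[1:], 1): reverse[f"{label}{i}"] = key
  let reverse : PySem.Dict String String :=
    pairs.foldl (fun d p =>
      (PySem.List.enumerate (PySem.List.slice p.2 (some 1) none) 1).foldl
        (fun d q => d.insert (p.1 ++ PySem.Int.toStr q.1) q.2) d) reverse
  -- forward = {key: alb for alb, key in reverse.items()}
  let forward : PySem.Dict String String :=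
    reverse.items.foldl (fun d p => d.insert p.2 p.1) PySem.Dict.empty
  -- additional = {alb: ("image" if alb.startswith("image") else "mask") for alb in reverse if alb not in ("image", "mask")}
  let additional : PySem.Dict String String :=
    reverse.keys.foldl (fun d k =>
      if k == "image" || k == "mask" then d
      else d.insert k (if PySem.Str.startswith k "image" then "image" else "mask"))
      PySem.Dict.empty
  (additional.items, forward.items, reverse.items)

-- ===== PRECONDITION & SPEC =====
def Spec_build_key_map_py (images : List String) (masks : List String) (out : (List (String × String)) × (List (String × String)) × (List (String × String))) : Prop := out = build_key_map_py_alt images masks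
instance (images : List String) (masks : List String) (out : (List (String × String)) × (List (String × String)) × (List (String × String))) : Decidable (Spec_build_key_map_py images masks out) := by unfold Spec_build_key_map_py; infer_instance

-- ===== CLAIM (what is proved, stated in full; the proofs are below) =====
def Claim_equal_build_key_map_py : Prop := ∀ (images : List String) (masks : List String), Dom_build_key_map_py images masks → Spec_build_key_map_py images masks (build_key_map_py images masks)

-- ===== LEMMAS AND PROOFS =====

-- A's triple-state loop splits into three independent dict folds.
theorem step_split (lab : String) (l : List (Int × String))
    (fw rv ad : PySem.Dict String String) :
    l.foldl (fun st p =>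
        (st.1.insert p.2 (lab ++ PySem.Int.toStr p.1),
         st.2.1.insert (lab ++ PySem.Int.toStr p.1) p.2,
         st.2.2.insert (lab ++ PySem.Int.toStr p.1) lab)) (fw, rv, ad)
      = (l.foldl (fun d p => d.insert p.2 (lab ++ PySem.Int.toStr p.1)) fw,
         l.foldl (fun d p => d.insert (lab ++ PySem.Int.toStr p.1) p.2) rv,
         l.foldl (fun d p => d.insert (lab ++ PySem.Int.toStr p.1) lab) ad) := by
  induction l generalizing fw rv ad with
  | nil => rfl
  | cons x xs ih => simp [List.foldl_cons, ih]

-- the (alb key, original key) pairs contributed by the tail of one list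
def tsL (lab : String) (lst : List String) : List (String × String) :=
  (PySem.List.enumerate (PySem.List.slice lst (some 1) none) 1).map
    (fun q => (lab ++ PySem.Int.toStr q.1, q.2))

-- the head (alb key, original key) pairs
def hsL (images masks : List String) : List (String × String) :=
  (match images with | [] => [] | x :: _ => [("image", x)]) ++
  (match masks with | [] => [] | x :: _ => [("mask", x)])

-- the full insertion sequence of the reverse dict
def keyL (images masks : List String) : List (String × String) :=
  hsL images masks ++ tsL "image" images ++ tsL "mask" masks

-- str(n) digits: accumulator lemma for core's Nat.toDigitsCore
theorem tdc_acc (fuel : Nat) : ∀ (n : Nat) (ds : List Char),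
    Nat.toDigitsCore 10 fuel n ds = Nat.toDigitsCore 10 fuel n [] ++ ds := by
  induction fuel with
  | zero => intro n ds; simp [Nat.toDigitsCore]
  | succ f ih =>
    intro n ds
    simp only [Nat.toDigitsCore]
    by_cases h : n / 10 = 0
    · simp [h]
    · simp only [h, if_false]
      rw [ih (n/10) (_ :: ds), ih (n/10) [_]]
      simp

-- str(n) is the base-10 digits of n, most significant first
theorem tdc_spec (fuel : Nat) : ∀ (n : Nat), 0 < n → n < fuel →
    Nat.toDigitsCore 10 fuel n [] = ((Nat.digits 10 n).map Nat.digitChar).reverse := by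
  induction fuel with
  | zero => intro n _ h; omega
  | succ f ih =>
    intro n hn hf
    simp only [Nat.toDigitsCore]
    rw [Nat.digits_def' (by norm_num) hn]
    by_cases h : n / 10 = 0
    · simp [h]
    · simp only [h, if_false]
      have hlt : n / 10 < f := by
        have := Nat.div_lt_self hn (show 1 < 10 by norm_num); omega
      rw [tdc_acc, ih (n/10) (Nat.pos_of_ne_zero h) hlt]
      simp

theorem digitChar_inj_small (a b : Nat) (ha : a < 10) (hb : b < 10)
    (h : Nat.digitChar a = Nat.digitChar b) : a = b := by
  interval_cases a <;> interval_cases b <;> simp_all [Nat.digitChar]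

theorem toChars_pos (i : Int) (h : 1 ≤ i) :
    PySem.Int.toChars i = Nat.toDigits 10 i.toNat := by
  simp [PySem.Int.toChars, show ¬ i < 0 by omega]

theorem toChars_inj (i j : Int) (hi : 1 ≤ i) (hj : 1 ≤ j)
    (h : PySem.Int.toChars i = PySem.Int.toChars j) : i = j := by
  rw [toChars_pos i hi, toChars_pos j hj] at h
  have hni : 0 < i.toNat := by omega
  have hnj : 0 < j.toNat := by omega
  unfold Nat.toDigits at h
  rw [tdc_spec _ _ hni (by omega), tdc_spec _ _ hnj (by omega)] at h
  have h2 : (Nat.digits 10 i.toNat).map Nat.digitChar = (Nat.digits 10 j.toNat).map Nat.digitChar := by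
    simpa using congrArg List.reverse h
  have h3 : Nat.digits 10 i.toNat = Nat.digits 10 j.toNat := by
    clear h
    generalize hA : Nat.digits 10 i.toNat = A at *
    generalize hB : Nat.digits 10 j.toNat = B at *
    have bA : ∀ d ∈ A, d < 10 := by intro d hd; exact Nat.digits_lt_base (by norm_num) (hA ▸ hd)
    have bB : ∀ d ∈ B, d < 10 := by intro d hd; exact Nat.digits_lt_base (by norm_num) (hB ▸ hd)
    clear hA hB
    induction A generalizing B with
    | nil => cases B <;> simp_all
    | cons a as ihA =>
      cases B with
      | nil => simp_all
      | cons b bs =>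
        simp only [List.map_cons, List.cons.injEq] at h2
        have := digitChar_inj_small a b (bA a (by simp)) (bB b (by simp)) h2.1
        exact by
          simp only [List.cons.injEq]
          exact ⟨this, ihA bs h2.2 (fun d hd => bA d (by simp [hd])) (fun d hd => bB d (by simp [hd]))⟩
  have := congrArg (Nat.ofDigits 10) h3
  rw [Nat.ofDigits_digits, Nat.ofDigits_digits] at this
  omega

theorem toChars_ne_nil (i : Int) (h : 1 ≤ i) : PySem.Int.toChars i ≠ [] := by
  rw [toChars_pos i h]
  unfold Nat.toDigits
  rw [tdc_spec _ _ (by omega) (by omega)]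
  simp [Nat.digits_ne_nil_iff_ne_zero, show i.toNat ≠ 0 by omega]

theorem toS_list (i : Int) : (PySem.Int.toStr i).toList = PySem.Int.toChars i :=
  PySem.Int.toList_toStr i

theorem alb_inj (lab : String) (i j : Int) (hi : 1 ≤ i) (hj : 1 ≤ j)
    (h : lab ++ PySem.Int.toStr i = lab ++ PySem.Int.toStr j) : i = j := by
  have := congrArg String.toList h
  simp only [String.toList_append, toS_list, List.append_cancel_left_eq] at this
  exact toChars_inj i j hi hj this

theorem alb_ne_self (lab : String) (i : Int) (hi : 1 ≤ i) :
    lab ++ PySem.Int.toStr i ≠ lab := by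
  intro h
  have := congrArg String.toList h
  rw [String.toList_append, toS_list] at this
  have : PySem.Int.toChars i = [] := by
    have h2 : lab.toList ++ PySem.Int.toChars i = lab.toList ++ [] := by simpa using this
    exact List.append_cancel_left h2
  exact toChars_ne_nil i hi this

theorem image_mask_lists : "image".toList = ['i','m','a','g','e'] ∧ "mask".toList = ['m','a','s','k'] := by
  constructor <;> rfl

theorem albI_ne_albM (i j : Int) :
    "image" ++ PySem.Int.toStr i ≠ "mask" ++ PySem.Int.toStr j := by
  intro h
  have := congrArg String.toList h
  rw [String.toList_append, String.toList_append, image_mask_lists.1, image_mask_lists.2] at this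
  simp at this

theorem albI_ne_mask (i : Int) : "image" ++ PySem.Int.toStr i ≠ "mask" := by
  intro h
  have := congrArg String.toList h
  rw [String.toList_append, image_mask_lists.1, image_mask_lists.2] at this
  simp at this

theorem albM_ne_image (j : Int) : "mask" ++ PySem.Int.toStr j ≠ "image" := by
  intro h
  have := congrArg String.toList h
  rw [String.toList_append, image_mask_lists.1, image_mask_lists.2] at this
  simp at this

theorem sw_albI (i : Int) : PySem.Str.startswith ("image" ++ PySem.Int.toStr i) "image" = true := by
  rw [PySem.Str.startswith_eq, PySem.Chars.startswith_iff, String.toList_append]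
  exact List.prefix_append _ _

theorem sw_albM (j : Int) : PySem.Str.startswith ("mask" ++ PySem.Int.toStr j) "image" = false := by
  rw [PySem.Str.startswith_eq]
  by_contra h
  have h2 : PySem.Chars.startswith ("mask" ++ PySem.Int.toStr j).toList "image".toList = true := by
    revert h; cases PySem.Chars.startswith ("mask" ++ PySem.Int.toStr j).toList "image".toList <;> simp
  rw [PySem.Chars.startswith_iff, String.toList_append, image_mask_lists.1, image_mask_lists.2] at h2
  obtain ⟨t, ht⟩ := h2
  simp at ht

-- every alb key of a tail segment is lab ++ str(i) with i ≥ 1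
theorem mem_ts_fst (lab : String) (lst : List String) (k : String)
    (hk : k ∈ (tsL lab lst).map Prod.fst) : ∃ i : Int, 1 ≤ i ∧ k = lab ++ PySem.Int.toStr i := by
  simp only [tsL, List.map_map, List.mem_map] at hk
  obtain ⟨q, hq, rfl⟩ := hk
  rw [PySem.List.mem_enumerate_iff] at hq
  obtain ⟨m, hm, rfl⟩ := hq
  exact ⟨1 + m, by omega, rfl⟩

-- tail alb keys of one segment are pairwise distinct
theorem nodup_ts_fst (lab : String) (lst : List String) : ((tsL lab lst).map Prod.fst).Nodup := by
  simp only [tsL, List.map_map]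
  rw [List.nodup_iff_pairwise_ne, List.pairwise_map]
  refine List.Pairwise.imp_of_mem ?_ (PySem.List.pairwise_lt_enumerate (PySem.List.slice lst (some 1) none) 1)
  intro p q hp hq hlt
  rw [PySem.List.mem_enumerate_iff] at hp hq
  obtain ⟨m, _, rfl⟩ := hp
  obtain ⟨m', _, rfl⟩ := hq
  intro h
  have := alb_inj lab _ _ (by omega) (by omega) h
  omega

-- the whole insertion sequence of reverse has pairwise-distinct keys
theorem mem_hs_fst (images masks : List String) (k : String)
    (hk : k ∈ (hsL images masks).map Prod.fst) : k = "image" ∨ k = "mask" := by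
  rcases images with _ | ⟨x, xs⟩ <;> rcases masks with _ | ⟨y, ys⟩ <;> simp_all [hsL]

theorem nodup_keyL (images masks : List String) : ((keyL images masks).map Prod.fst).Nodup := by
  have hI := nodup_ts_fst "image" images
  have hM := nodup_ts_fst "mask" masks
  have htails : ((tsL "image" images).map Prod.fst ++ (tsL "mask" masks).map Prod.fst).Nodup := by
    rw [List.nodup_append]
    refine ⟨hI, hM, ?_⟩
    intro k hk k' hk'
    obtain ⟨i, hi, rfl⟩ := mem_ts_fst _ _ _ hk
    obtain ⟨j, hj, rfl⟩ := mem_ts_fst _ _ _ hk'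
    exact albI_ne_albM i j
  have hhead : ((hsL images masks).map Prod.fst).Nodup := by
    rcases images with _ | ⟨x, xs⟩ <;> rcases masks with _ | ⟨y, ys⟩ <;> simp [hsL]
  have : ((hsL images masks).map Prod.fst ++
      ((tsL "image" images).map Prod.fst ++ (tsL "mask" masks).map Prod.fst)).Nodup := by
    rw [List.nodup_append]
    refine ⟨hhead, htails, ?_⟩
    intro k hk k' hk'
    rcases List.mem_append.mp hk' with h | h
    · obtain ⟨i, hi, h⟩ := mem_ts_fst _ _ _ h
      subst h
      rcases mem_hs_fst _ _ _ hk with rfl | rfl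
      · exact fun h => alb_ne_self "image" i hi h.symm
      · exact fun h => albI_ne_mask i h.symm
    · obtain ⟨j, hj, h⟩ := mem_ts_fst _ _ _ h
      subst h
      rcases mem_hs_fst _ _ _ hk with rfl | rfl
      · exact fun h => albM_ne_image j h.symm
      · exact fun h => alb_ne_self "mask" j hj h.symm
  simpa [keyL, List.append_assoc] using this

-- the reverse dict lists exactly its insertion sequence
theorem items_keyL (images masks : List String) :
    ((keyL images masks).foldl (fun d p => d.insert p.1 p.2) (PySem.Dict.empty : PySem.Dict String String)).items
      = keyL images masks := by
  have := PySem.Dict.items_foldl_insert_fresh (keyL images masks) Prod.fst Prod.snd PySem.Dict.empty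
    (by intro a _; simp) (nodup_keyL images masks)
  simpa using this

-- A's result, split into three folds over the shared insertion sequences
theorem A_char (images masks : List String) : build_key_map_py images masks =
  ( (((tsL "image" images).map (fun p => (p.1, ("image" : String)))
     ++ (tsL "mask" masks).map (fun p => (p.1, ("mask" : String)))).foldl
       (fun d p => d.insert p.1 p.2) (PySem.Dict.empty : PySem.Dict String String)).items,
    ((keyL images masks).foldl (fun d p => d.insert p.2 p.1) (PySem.Dict.empty : PySem.Dict String String)).items,
    ((keyL images masks).foldl (fun d p => d.insert p.1 p.2) (PySem.Dict.empty : PySem.Dict String String)).items ) := by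
  rcases images <;> rcases masks <;>
    simp [build_key_map_py, step_split, keyL, hsL, tsL, List.foldl_append, List.foldl_map]

-- B's guarded comprehension over reverse's keys, restricted to one tail segment
theorem g_tsI (lst : List String) (d : PySem.Dict String String) :
    ((tsL "image" lst).map Prod.fst).foldl
      (fun d k => if k == "image" || k == "mask" then d
        else d.insert k (if PySem.Str.startswith k "image" then "image" else "mask")) d
    = ((tsL "image" lst).map (fun p => (p.1, ("image" : String)))).foldl
        (fun d p => d.insert p.1 p.2) d := by
  rw [List.foldl_map, List.foldl_map]
  refine PySem.List.foldl_congr_mem _ _ _ _ ?_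
  intro acc p hp
  obtain ⟨i, hi, hk⟩ := mem_ts_fst "image" lst p.1 (List.mem_map_of_mem hp)
  rw [hk, sw_albI i]
  simp [alb_ne_self "image" i hi, albI_ne_mask i]

theorem g_tsM (lst : List String) (d : PySem.Dict String String) :
    ((tsL "mask" lst).map Prod.fst).foldl
      (fun d k => if k == "image" || k == "mask" then d
        else d.insert k (if PySem.Str.startswith k "image" then "image" else "mask")) d
    = ((tsL "mask" lst).map (fun p => (p.1, ("mask" : String)))).foldl
        (fun d p => d.insert p.1 p.2) d := by
  rw [List.foldl_map, List.foldl_map]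
  refine PySem.List.foldl_congr_mem _ _ _ _ ?_
  intro acc p hp
  obtain ⟨j, hj, hk⟩ := mem_ts_fst "mask" lst p.1 (List.mem_map_of_mem hp)
  rw [hk, sw_albM j]
  simp [albM_ne_image j, alb_ne_self "mask" j hj]

-- B's result, in the same shape
theorem B_char (images masks : List String) : build_key_map_py_alt images masks =
  ( (((tsL "image" images).map (fun p => (p.1, ("image" : String)))
     ++ (tsL "mask" masks).map (fun p => (p.1, ("mask" : String)))).foldl
       (fun d p => d.insert p.1 p.2) (PySem.Dict.empty : PySem.Dict String String)).items,
    ((keyL images masks).foldl (fun d p => d.insert p.2 p.1) (PySem.Dict.empty : PySem.Dict String String)).items,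
    ((keyL images masks).foldl (fun d p => d.insert p.1 p.2) (PySem.Dict.empty : PySem.Dict String String)).items ) := by
  have hrev : (([(("image" : String), images), (("mask" : String), masks)].foldl
      (fun (d : PySem.Dict String String) p =>
        (PySem.List.enumerate (PySem.List.slice p.2 (some 1) none) 1).foldl
          (fun d q => d.insert (p.1 ++ PySem.Int.toStr q.1) q.2) d)
      ([(("image" : String), images), (("mask" : String), masks)].foldl
        (fun (d : PySem.Dict String String) p =>
          match p.2 with
          | [] => d
          | x :: _ => d.insert p.1 x) PySem.Dict.empty)))
      = (keyL images masks).foldl (fun d p => d.insert p.1 p.2) PySem.Dict.empty := by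
    rcases images <;> rcases masks <;>
      simp [keyL, hsL, tsL, List.foldl_append, List.foldl_map]
  unfold build_key_map_py_alt
  dsimp only
  rw [hrev, items_keyL]
  refine congrArg₂ _ ?_ (congrArg₂ _ ?_ rfl)
  · -- additional: keys = items.map fst = keyL.map fst, then segment lemmas
    have hkeys : ((keyL images masks).foldl (fun d p => d.insert p.1 p.2)
        (PySem.Dict.empty : PySem.Dict String String)).keys = (keyL images masks).map Prod.fst := by
      simp [PySem.Dict.keys, items_keyL]
    rw [hkeys]
    have hsplit : (keyL images masks).map Prod.fst
        = (hsL images masks).map Prod.fst ++ ((tsL "image" images).map Prod.fst ++ (tsL "mask" masks).map Prod.fst) := by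
      simp [keyL]
    rw [hsplit, List.foldl_append, List.foldl_append]
    have hhead : ∀ d : PySem.Dict String String,
        ((hsL images masks).map Prod.fst).foldl
          (fun d k => if k == "image" || k == "mask" then d
            else d.insert k (if PySem.Str.startswith k "image" then "image" else "mask")) d = d := by
      intro d
      rcases images <;> rcases masks <;> simp [hsL]
    rw [hhead, g_tsI, g_tsM, List.foldl_append]
  · -- forward: fold over reverse.items inverted = fold over keyL inverted
    rfl

-- ===== VERDICT (by name: the statement is the Claim_ definition above) =====
theorem build_key_map_py_spec : Claim_equal_build_key_map_py := by
  intro images masks _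
  show build_key_map_py images masks = build_key_map_py_alt images masks
  rw [A_char, B_char]
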